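-- pv_equiv track=rewrite | github.com/ImTheNit/AutomatePython | Projet.py | VerifSaisieEtat
-- ===== SOURCE A (Python) =====
-- RESTRICTION_CHOIX_ETAT=[";"," "]
--
-- def VerifSaisieEtat(choix):#en attente de savoir quels caractères sont interdits
--     # Verifie qu'un etat saisie lors du choix de la modification est correct
--     #-> difference avec VerifSaisieNewEtat: on peut choisir un champ qui n'existe pas encore
--
--     # Retourne False si la saisie n'est pas valide
--     # Retourne True si la saisie est valide
--
--     if choix == "":    #chaine vide
--         return False
--
--     else:
--
--         for i in range(len(RESTRICTION_CHOIX_ETAT)):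
--             if RESTRICTION_CHOIX_ETAT[i] in choix:                  # on verifie qu'aucun caractère interdit n'est utilisé
--                 return False
--
--         return True
-- ===== SOURCE B (Python) =====
-- FORBIDDEN = {";", " "}
--
-- def VerifSaisieEtat(choix):
--     # one pass over the characters of choix instead of substring-scanning per forbidden string
--     if choix == "":
--         return False
--     return all(c not in FORBIDDEN for c in choix)
-- ===== Notes on version B (the rewrite author's own statement) =====
-- stated objective: idiomatic
-- what changed: B makes a single pass over the characters of choix testing each against a forbidden set, instead of A's loop over the forbidden list doing a full substring scan of choix per entry.
import Mathlib
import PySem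

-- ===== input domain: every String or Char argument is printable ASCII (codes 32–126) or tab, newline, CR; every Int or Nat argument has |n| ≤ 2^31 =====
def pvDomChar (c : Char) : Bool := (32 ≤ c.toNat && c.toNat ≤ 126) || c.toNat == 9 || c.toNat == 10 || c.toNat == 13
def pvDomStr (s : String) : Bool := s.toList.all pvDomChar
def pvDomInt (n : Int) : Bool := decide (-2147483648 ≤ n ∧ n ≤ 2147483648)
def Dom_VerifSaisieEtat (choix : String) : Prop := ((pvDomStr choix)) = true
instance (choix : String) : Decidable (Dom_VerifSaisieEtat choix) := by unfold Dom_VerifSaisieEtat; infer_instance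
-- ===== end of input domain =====

-- B replaces A's per-forbidden-string substring scans with one character pass over choix (idiomatic).

-- ===== PORT A =====
def RESTRICTION_CHOIX_ETAT : List String := [";", " "]

-- the 'for i in range(...)' loop with its early 'return False'
def pvLoopA (choix : String) : List Int → Bool
  | [] => true
  | i :: rest =>
      if PySem.Str.isIn ((PySem.List.pyGet? RESTRICTION_CHOIX_ETAT i).getD "") choix then false
      else pvLoopA choix rest

def VerifSaisieEtat (choix : String) : Bool :=
  if choix == "" then false
  else pvLoopA choix (PySem.List.pyRange 0 (Int.ofNat RESTRICTION_CHOIX_ETAT.length) 1)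

-- ===== PORT B =====
def pvForbidden : PySem.Set Char := PySem.Set.ofList [';', ' ']

def VerifSaisieEtat_alt (choix : String) : Bool :=
  if choix == "" then false
  else choix.toList.all (fun c => !(pvForbidden.contains c))

-- ===== PRECONDITION & SPEC =====
def Spec_VerifSaisieEtat (choix : String) (out : Bool) : Prop := out = VerifSaisieEtat_alt choix
instance (choix : String) (out : Bool) : Decidable (Spec_VerifSaisieEtat choix out) := by unfold Spec_VerifSaisieEtat; infer_instance

-- ===== CLAIM (what is proved, stated in full; the proofs are below) =====
def Claim_equal_VerifSaisieEtat : Prop := ∀ (choix : String), Dom_VerifSaisieEtat choix → Spec_VerifSaisieEtat choix (VerifSaisieEtat choix)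

-- ===== LEMMAS AND PROOFS =====

theorem pv_singleton_infix {c : Char} {l : List Char} : [c] <:+: l ↔ c ∈ l := by
  constructor
  · intro h
    exact List.singleton_sublist.mp h.sublist
  · intro h
    obtain ⟨s, t, rfl⟩ := List.append_of_mem h
    exact ⟨s, t, by simp⟩

theorem pv_isIn_singleton (c : Char) (l : List Char) :
    PySem.Chars.isIn [c] l = l.contains c := by
  rw [Bool.eq_iff_iff, PySem.Chars.isIn_iff_infix, pv_singleton_infix]
  simp

-- ===== VERDICT (by name: the statement is the Claim_ definition above) =====
theorem VerifSaisieEtat_spec : Claim_equal_VerifSaisieEtat := by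
  intro choix _
  unfold Spec_VerifSaisieEtat VerifSaisieEtat VerifSaisieEtat_alt
  by_cases hE : choix == ""
  · simp [hE]
  · simp only [hE, if_false]
    have hr : PySem.List.pyRange 0 (Int.ofNat RESTRICTION_CHOIX_ETAT.length) 1 = [0, 1] := by
      decide
    rw [hr]
    simp only [pvLoopA, PySem.List.pyGet?, PySem.List.pyIdx?, RESTRICTION_CHOIX_ETAT]
    norm_num
    have e1 : (";" : String).toList = [';'] := rfl
    have e2 : (" " : String).toList = [' '] := rfl
    rw [e1, e2, pv_isIn_singleton, pv_isIn_singleton]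
    by_cases a1 : ';' ∈ choix.toList <;> by_cases a2 : ' ' ∈ choix.toList <;>
      simp [a1, a2, pvForbidden, PySem.Set.ofList, List.all_eq_true, PySem.Set.contains]
    · exact ⟨';', a1, by simp⟩
    · exact ⟨';', a1, by simp⟩
    · exact ⟨' ', a2, by simp⟩
    · intro c hc
      constructor <;> rintro rfl <;> [exact a1 hc; exact a2 hc]
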